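-- pv_equiv track=rewrite | github.com/consuly/content-atlas | app/domain/imports/schema_mapper.py | transform_record
-- ===== SOURCE A (Python) =====
-- from typing import Dict, List, Any, Optional, Tuple
--
-- def transform_record(
--     source_record: Dict[str, Any],
--     column_mapping: Dict[str, Optional[str]],
--     target_schema: Dict[str, str]
-- ) -> Dict[str, Any]:
--     """
--     Transform a source record to match the target schema.
--
--     Args:
--         source_record: Record from source file
--         column_mapping: Mapping from source columns to target columns
--         target_schema: Target table schema (column_name -> data_type)
--
--     Returns:
--         Transformed record with target column names ONLY (no source columns)
--     """
--     transformed = {}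
--
--     for source_col, value in source_record.items():
--         target_col = column_mapping.get(source_col)
--
--         if target_col:
--             # Map to target column - only include if mapped
--             # Avoid duplicates by checking if already set
--             if target_col not in transformed:
--                 transformed[target_col] = value
--             else:
--                 # Multiple source columns map to same target - keep first non-null value
--                 if transformed[target_col] is None and value is not None:
--                     transformed[target_col] = value
--         # Note: Unmapped source columns are intentionally ignored
--         # They should not appear in the final record
--
--     # Fill in missing target columns with None
--     for target_col in target_schema.keys():
--         if target_col not in transformed:
--             transformed[target_col] = None
--
--     return transformed
-- ===== SOURCE B (Python) =====
-- def transform_record(source_record, column_mapping, target_schema):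
--     # Collect-then-reduce: group source values per truthy mapped target, then
--     # pick first non-null (else the first value) per target, then fill schema gaps.
--     groups = {}
--     for source_col, value in source_record.items():
--         target_col = column_mapping.get(source_col)
--         if target_col:
--             groups.setdefault(target_col, []).append(value)
--     transformed = {t: next((v for v in vals if v is not None), vals[0])
--                    for t, vals in groups.items()}
--     for target_col in target_schema:
--         if target_col not in transformed:
--             transformed[target_col] = None
--     return transformed
-- ===== Notes on version B (the rewrite author's own statement) =====
-- stated objective: alternative
-- what changed: Replaces A's in-place running aggregation (conditionally overwriting the target dict while scanning) with a collect-then-reduce decomposition: one pass groups all values per truthy mapped target into lists, a second pass reduces each group to its first non-null value (else its first value), then schema gaps are filled with None.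
import Mathlib
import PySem

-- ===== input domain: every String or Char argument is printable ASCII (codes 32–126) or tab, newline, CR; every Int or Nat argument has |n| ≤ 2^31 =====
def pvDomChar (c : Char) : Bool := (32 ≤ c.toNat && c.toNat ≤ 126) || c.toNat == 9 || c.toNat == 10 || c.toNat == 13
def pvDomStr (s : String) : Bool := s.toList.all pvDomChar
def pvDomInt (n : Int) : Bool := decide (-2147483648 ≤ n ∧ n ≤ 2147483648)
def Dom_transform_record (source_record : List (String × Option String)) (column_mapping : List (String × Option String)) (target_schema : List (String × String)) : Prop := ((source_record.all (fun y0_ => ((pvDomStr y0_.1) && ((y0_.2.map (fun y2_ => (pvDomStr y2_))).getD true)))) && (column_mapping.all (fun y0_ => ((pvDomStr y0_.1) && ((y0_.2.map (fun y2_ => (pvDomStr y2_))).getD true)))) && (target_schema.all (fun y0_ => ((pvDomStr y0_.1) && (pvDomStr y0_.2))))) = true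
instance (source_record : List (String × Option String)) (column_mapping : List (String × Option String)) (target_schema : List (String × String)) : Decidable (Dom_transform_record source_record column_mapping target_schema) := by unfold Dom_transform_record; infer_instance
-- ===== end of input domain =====

-- B replaces A's in-place running aggregation with a collect-then-reduce decomposition
-- (group values per target, then pick the first non-null per group); same cost, different structure.

-- ===== PORT A =====
-- dicts arrive as assoc lists; Python builds real dicts from them: model with PySem.Dict.ofList
def transform_record (source_record : List (String × Option String)) (column_mapping : List (String × Option String)) (target_schema : List (String × String)) : List (String × Option String) :=
  let cm := PySem.Dict.ofList column_mapping
  let ts := PySem.Dict.ofList target_schema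
  let transformed :=
    (PySem.Dict.ofList source_record).items.foldl
      (fun tr p =>
        match (cm.get? p.1).getD none with          -- column_mapping.get(source_col)
        | none => tr
        | some tc =>
          if tc ≠ "" then                            -- `if target_col:` (None and "" are falsy)
            if tr.contains tc = false then tr.insert tc p.2
            else if tr.getD tc none = none ∧ p.2 ≠ none then tr.insert tc p.2
                 -- tr.getD tc none is exact for transformed[target_col]: tc is present here
            else tr
          else tr)
      PySem.Dict.empty
  let transformed := ts.keys.foldl
      (fun tr t => if tr.contains t = false then tr.insert t none else tr) transformed
  transformed.items

-- ===== PORT B =====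
-- next((v for v in vals if v is not None), vals[0]); headD is exact: groups' lists are nonempty
def pvRed (vals : List (Option String)) : Option String :=
  match vals.find? (fun v => v.isSome) with
  | some v => v
  | none => vals.headD none

def transform_record_alt (source_record : List (String × Option String)) (column_mapping : List (String × Option String)) (target_schema : List (String × String)) : List (String × Option String) :=
  let cm := PySem.Dict.ofList column_mapping
  let ts := PySem.Dict.ofList target_schema
  let groups :=
    (PySem.Dict.ofList source_record).items.foldl
      (fun g p =>
        match (cm.get? p.1).getD none with
        | none => g
        | some tc =>
          if tc ≠ "" then g.modify tc [] (fun vs => vs ++ [p.2])   -- setdefault(..., []).append(value)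
          else g)
      PySem.Dict.empty
  let transformed : PySem.Dict String (Option String) :=
    PySem.Dict.mk (groups.items.map (fun p => (p.1, pvRed p.2)))   -- the dict comprehension
  let transformed := ts.keys.foldl
      (fun tr t => if tr.contains t = false then tr.insert t none else tr) transformed
  transformed.items

-- ===== PRECONDITION & SPEC =====
def Spec_transform_record (source_record : List (String × Option String)) (column_mapping : List (String × Option String)) (target_schema : List (String × String)) (out : List (String × Option String)) : Prop := out = transform_record_alt source_record column_mapping target_schema
instance (source_record : List (String × Option String)) (column_mapping : List (String × Option String)) (target_schema : List (String × String)) (out : List (String × Option String)) : Decidable (Spec_transform_record source_record column_mapping target_schema out) := by unfold Spec_transform_record; infer_instance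

-- ===== CLAIM (what is proved, stated in full; the proofs are below) =====
def Claim_equal_transform_record : Prop := ∀ (source_record : List (String × Option String)) (column_mapping : List (String × Option String)) (target_schema : List (String × String)), Dom_transform_record source_record column_mapping target_schema → Spec_transform_record source_record column_mapping target_schema (transform_record source_record column_mapping target_schema)

-- ===== LEMMAS AND PROOFS =====

-- A's loop step and B's loop step, named for the proofs (definitionally the ports' lambdas)
def pvStepA (cm : PySem.Dict String (Option String)) (tr : PySem.Dict String (Option String)) (p : String × Option String) : PySem.Dict String (Option String) :=
  match (cm.get? p.1).getD none with
  | none => tr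
  | some tc =>
    if tc ≠ "" then
      if tr.contains tc = false then tr.insert tc p.2
      else if tr.getD tc none = none ∧ p.2 ≠ none then tr.insert tc p.2
      else tr
    else tr

def pvStepB (cm : PySem.Dict String (Option String)) (g : PySem.Dict String (List (Option String))) (p : String × Option String) : PySem.Dict String (List (Option String)) :=
  match (cm.get? p.1).getD none with
  | none => g
  | some tc =>
    if tc ≠ "" then g.modify tc [] (fun vs => vs ++ [p.2]) else g

def pvReduceD (g : PySem.Dict String (List (Option String))) : PySem.Dict String (Option String) :=
  PySem.Dict.mk (g.items.map (fun p => (p.1, pvRed p.2)))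

lemma pvRed_singleton (v : Option String) : pvRed [v] = v := by
  cases v <;> rfl

lemma headD_none_of_find?_none (vals : List (Option String))
    (h : vals.find? (fun v => v.isSome) = none) : vals.head?.getD none = none := by
  cases vals with
  | nil => rfl
  | cons a t =>
    rw [List.find?_cons] at h
    split at h
    · exact absurd h (by simp)
    · cases a with
      | none => rfl
      | some s => simp_all

lemma pvRed_append (vals : List (Option String)) (v : Option String) :
    pvRed (vals ++ [v]) = if pvRed vals = none ∧ v ≠ none then v else pvRed vals := by
  unfold pvRed
  rw [List.find?_append]
  cases hf : vals.find? (fun v => v.isSome) with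
  | some w =>
    have hw : w.isSome := by simpa using List.find?_some hf
    have hwn : ¬(w = none ∧ v ≠ none) := by
      rintro ⟨h1, -⟩; subst h1; simp at hw
    simp [hwn]
  | none =>
    have hh := headD_none_of_find?_none vals hf
    cases v with
    | none =>
      simp [hh]
    | some s => simp [hh]

lemma pvReduceD_get? (g : PySem.Dict String (List (Option String))) (k : String) :
    (pvReduceD g).get? k = (g.get? k).map pvRed := by
  simp [pvReduceD, PySem.Dict.get?, List.find?_map, Function.comp_def, Option.map_map]

lemma pvReduceD_contains (g : PySem.Dict String (List (Option String))) (k : String) :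
    (pvReduceD g).contains k = g.contains k := by
  simp [pvReduceD, PySem.Dict.contains, List.any_map, Function.comp_def]

lemma pvSnd_eq_of_mem (g : PySem.Dict String (List (Option String))) (hg : g.keys.Nodup)
    {q : String × List (Option String)} (hq : q ∈ g.items) {vals : List (Option String)}
    (hv : g.get? q.1 = some vals) : q.2 = vals := by
  have h := PySem.Dict.get?_of_mem_items g (show (q.1, q.2) ∈ g.items from hq) hg
  rw [hv] at h
  exact (Option.some.injEq _ _ ▸ h).symm

lemma pvStepB_nodup (cm : PySem.Dict String (Option String))
    (g : PySem.Dict String (List (Option String))) (hg : g.keys.Nodup)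
    (p : String × Option String) : (pvStepB cm g p).keys.Nodup := by
  unfold pvStepB
  cases hsc : (cm.get? p.1).getD none with
  | none => exact hg
  | some tc =>
    show (if tc ≠ "" then g.modify tc [] (fun vs => vs ++ [p.2]) else g).keys.Nodup
    split_ifs with h
    · unfold PySem.Dict.modify
      by_cases hc : g.contains tc = true
      · rw [PySem.Dict.keys_insert_of_contains g _ hc]; exact hg
      · have hc' : g.contains tc = false := by simpa using hc
        rw [PySem.Dict.keys_insert_of_not_contains g _ hc']
        refine hg.append (List.nodup_singleton tc) ?_
        intro a ha hb
        rw [List.mem_singleton] at hb; subst hb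
        rw [← PySem.Dict.contains_iff_mem_keys] at ha
        rw [ha] at hc'; cases hc'
    · exact hg

lemma pvStep_comm (cm : PySem.Dict String (Option String))
    (g : PySem.Dict String (List (Option String))) (hg : g.keys.Nodup)
    (p : String × Option String) :
    pvStepA cm (pvReduceD g) p = pvReduceD (pvStepB cm g p) := by
  unfold pvStepA pvStepB
  cases hsc : (cm.get? p.1).getD none with
  | none => rfl
  | some tc =>
    show (if tc ≠ "" then
            if (pvReduceD g).contains tc = false then (pvReduceD g).insert tc p.2
            else if (pvReduceD g).getD tc none = none ∧ p.2 ≠ none then (pvReduceD g).insert tc p.2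
            else pvReduceD g
          else pvReduceD g)
        = pvReduceD (if tc ≠ "" then g.modify tc [] (fun vs => vs ++ [p.2]) else g)
    by_cases htc : tc ≠ ""
    case neg => rw [if_neg htc, if_neg htc]
    rw [if_pos htc, if_pos htc]
    clear hsc htc
    unfold PySem.Dict.modify
    by_cases hc : g.contains tc = true
    case pos =>
      have hv0 : (g.get? tc).isSome = true := by
        rw [← PySem.Dict.contains_eq_isSome_get? g tc]; exact hc
      obtain ⟨vals, hv⟩ := Option.isSome_iff_exists.mp hv0
      have hgd : g.getD tc [] = vals := by simp [PySem.Dict.getD, hv]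
      have hrd : (pvReduceD g).getD tc none = pvRed vals := by
        simp [PySem.Dict.getD, pvReduceD_get?, hv]
      rw [if_neg (by simp [pvReduceD_contains, hc]), hrd, hgd]
      have hkey : ∀ q ∈ g.items, (q.1 == tc) = true → q.2 = vals := by
        intro q hq hqt
        exact pvSnd_eq_of_mem g hg hq (by rwa [eq_of_beq hqt])
      have hitems : ∀ w : Option String,
          ((pvReduceD g).insert tc w).items
            = g.items.map (fun q => if (q.1 == tc) = true then (tc, w) else (q.1, pvRed q.2)) := by
        intro w
        rw [PySem.Dict.items_insert_of_contains _ _ (by rw [pvReduceD_contains]; exact hc)]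
        show (g.items.map (fun q => (q.1, pvRed q.2))).map _ = _
        rw [List.map_map]
        rfl
      have hrhs : (pvReduceD (g.insert tc (vals ++ [p.2]))).items
          = g.items.map (fun q => if (q.1 == tc) = true then (tc, pvRed (vals ++ [p.2])) else (q.1, pvRed q.2)) := by
        show ((g.insert tc (vals ++ [p.2])).items.map (fun q => (q.1, pvRed q.2))) = _
        rw [PySem.Dict.items_insert_of_contains _ _ hc, List.map_map]
        apply List.map_congr_left
        intro q hq
        by_cases hqt : (q.1 == tc) = true
        · simp only [Function.comp_def, if_pos hqt]
        · simp only [Function.comp_def, if_neg hqt]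
      by_cases hcond : pvRed vals = none ∧ p.2 ≠ none
      · rw [if_pos hcond]
        apply PySem.Dict.ext
        rw [hitems, hrhs]
        apply List.map_congr_left
        intro q hq
        by_cases hqt : (q.1 == tc) = true
        · rw [if_pos hqt, if_pos hqt, pvRed_append, if_pos hcond]
        · rw [if_neg hqt, if_neg hqt]
      · rw [if_neg hcond]
        apply PySem.Dict.ext
        rw [hrhs]
        show g.items.map (fun q => (q.1, pvRed q.2)) = _
        apply List.map_congr_left
        intro q hq
        show (q.1, pvRed q.2) = _
        by_cases hqt : (q.1 == tc) = true
        · rw [if_pos hqt, hkey q hq hqt, eq_of_beq hqt, pvRed_append, if_neg hcond]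
        · rw [if_neg hqt]
    case neg =>
      have hc' : g.contains tc = false := by simpa using hc
      rw [if_pos (by rw [pvReduceD_contains]; exact hc')]
      apply PySem.Dict.ext
      rw [PySem.Dict.items_insert_of_not_contains _ _ (by rw [pvReduceD_contains]; exact hc')]
      show (g.items.map (fun q => (q.1, pvRed q.2))) ++ [(tc, p.2)]
          = ((g.insert tc (g.getD tc [] ++ [p.2])).items.map (fun q => (q.1, pvRed q.2)))
      rw [PySem.Dict.items_insert_of_not_contains _ _ hc', List.map_append]
      rw [PySem.Dict.getD_of_not_contains g [] hc']
      simp [pvRed_singleton]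

lemma pvLoop_comm (cm : PySem.Dict String (Option String))
    (l : List (String × Option String))
    (g : PySem.Dict String (List (Option String))) (hg : g.keys.Nodup) :
    l.foldl (pvStepA cm) (pvReduceD g) = pvReduceD (l.foldl (pvStepB cm) g) := by
  induction l generalizing g with
  | nil => rfl
  | cons p t ih =>
    simp only [List.foldl_cons]
    rw [pvStep_comm cm g hg p]
    exact ih _ (pvStepB_nodup cm g hg p)

-- ===== VERDICT (by name: the statement is the Claim_ definition above) =====
theorem transform_record_spec : Claim_equal_transform_record := by
  intro source_record column_mapping target_schema _
  unfold Spec_transform_record transform_record transform_record_alt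
  show (List.foldl (fun tr k => if tr.contains k = false then tr.insert k none else tr)
          (List.foldl (pvStepA (PySem.Dict.ofList column_mapping)) (pvReduceD PySem.Dict.empty)
            (PySem.Dict.ofList source_record).items)
          (PySem.Dict.ofList target_schema).keys).items
      = (List.foldl (fun tr k => if tr.contains k = false then tr.insert k none else tr)
          (pvReduceD (List.foldl (pvStepB (PySem.Dict.ofList column_mapping)) PySem.Dict.empty
            (PySem.Dict.ofList source_record).items))
          (PySem.Dict.ofList target_schema).keys).items
  rw [pvLoop_comm _ _ _ PySem.Dict.nodup_keys_empty]
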